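-- pv_equiv track=rewrite | github.com/mmunozc/Code-problems | Python/p10651_Pebbles2.py | min_pebbles
-- ===== SOURCE A (Python) =====
-- def min_pebbles(case, registro):
--     # Contar Pebbles
--     mini  = case.count('o')
--     # Verificar que el tablero no haya sido solucionado antes
--     if case in registro:
--         return registro.get(case)
--
--     # Recorrer de izquierda a derecha el tablero buscando la forma base 'oo-'
--     # resolverla y cada vez que al nuevo subproblema se le aplica la función nuevamente
--     # se reconstruye al subproblema anterior para generar una nueva rama si se encuentra otro caso base
--     for i in range(len(case)-2):
--         if case[i] == 'o' and case[i+1] == 'o' and case[i+2] == '-':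
--             case = case[:i] + '--o'+ case[i+3:]
--             mini_nuevo = min_pebbles(case, registro)
--             case = case[:i] + 'oo-'+ case[i+3:]
--             if mini_nuevo < mini:
--                 mini = mini_nuevo
--
--     # Guardar solución
--     registro[case] = mini
--
--     # Recorrer de izquierda a derecha buscando el caso '-oo'
--     for i in range(len(case)-2):
--         if case[i] == '-' and case[i+1] == 'o' and case[i+2] == 'o':
--             case = case[:i] + 'o--'+ case[i+3:]
--             mini_nuevo = min_pebbles(case, registro)
--             case = case[:i] + '-oo'+ case[i+3:]
--             if mini_nuevo < mini:
--                 mini = mini_nuevo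
--
--     # Guardar solución
--     registro[case] = mini
--
--     return mini
-- ===== SOURCE B (Python) =====
-- def _succs(s):
--     out = []
--     for i in range(len(s) - 2):
--         w = s[i:i + 3]
--         if w == 'oo-':
--             out.append(s[:i] + '--o' + s[i + 3:])
--         elif w == '-oo':
--             out.append(s[:i] + 'o--' + s[i + 3:])
--     return out
--
--
-- def min_pebbles(case, registro):
--     if case in registro:
--         return registro[case]
--     # discover every uncached state reachable from `case`, level by level
--     # (each jump removes one pebble, so there are at most count+1 levels)
--     news = []
--     frontier = [case]
--     for _ in range(case.count('o') + 1):
--         nxt = []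
--         for s in frontier:
--             if s in news:
--                 continue
--             news.append(s)
--             for t in _succs(s):
--                 if t not in registro and t not in news:
--                     nxt.append(t)
--         frontier = nxt
--     # tabulate minima in increasing pebble count (successors lose a pebble,
--     # so every successor is cached or already tabulated)
--     for s in sorted(news, key=lambda s: s.count('o')):
--         best = s.count('o')
--         for t in _succs(s):
--             if registro[t] < best:
--                 best = registro[t]
--         registro[s] = best
--     return registro[case]
-- ===== Notes on version B (the rewrite author's own statement) =====
-- stated objective: alternative
-- what changed: Replaces A's memoized double-loop recursion by an iterative level-by-level (BFS) discovery of all uncached reachable boards followed by a tabulation of the minima in increasing pebble count; both still trust and fill the registro cache.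
import Mathlib
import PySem

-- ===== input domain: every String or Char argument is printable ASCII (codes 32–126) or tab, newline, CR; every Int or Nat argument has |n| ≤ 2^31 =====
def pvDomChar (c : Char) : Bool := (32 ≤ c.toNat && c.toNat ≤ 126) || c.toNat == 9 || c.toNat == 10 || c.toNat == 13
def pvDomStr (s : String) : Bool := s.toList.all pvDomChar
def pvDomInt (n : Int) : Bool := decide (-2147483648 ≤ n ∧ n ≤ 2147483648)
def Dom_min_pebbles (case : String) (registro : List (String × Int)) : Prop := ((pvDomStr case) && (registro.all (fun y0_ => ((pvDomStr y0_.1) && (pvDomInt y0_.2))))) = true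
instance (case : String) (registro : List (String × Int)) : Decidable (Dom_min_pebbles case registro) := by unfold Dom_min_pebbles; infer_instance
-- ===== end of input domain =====

-- B replaces A's memoized double-loop recursion by an iterative level-by-level discovery of the
-- reachable states followed by a tabulation in increasing pebble count (objective: alternative).
-- Both programs also write solved boards into `registro` (a caller-visible mutation, in different
-- orders); the equivalence proved here is about the RETURN value only.

-- ===== PORT A =====
-- A and B work on strings; the ports work on `List Char` (PySem string primitives are defined on
-- code-point lists) and on the dict re-keyed by `.toList`, which is injective, so lookups agree.

-- case.count('o')
def pvCnt (s : List Char) : Nat := PySem.Chars.count s ['o']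

-- case[:i] + mid + case[i+3:]
def pvSpliceA (s : List Char) (i : Int) (mid : List Char) : List Char :=
  PySem.List.slice s none (some i) ++ mid ++ PySem.List.slice s (some (i + 3)) none

-- case[i] == 'o' and case[i+1] == 'o' and case[i+2] == '-'   (i always in range inside the loop)
def pvOmatch (s : List Char) (i : Int) : Bool :=
  PySem.List.pyGetD s i ' ' == 'o' && PySem.List.pyGetD s (i + 1) ' ' == 'o' &&
    PySem.List.pyGetD s (i + 2) ' ' == '-'

-- case[i] == '-' and case[i+1] == 'o' and case[i+2] == 'o'
def pvDmatch (s : List Char) (i : Int) : Bool :=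
  PySem.List.pyGetD s i ' ' == '-' && PySem.List.pyGetD s (i + 1) ' ' == 'o' &&
    PySem.List.pyGetD s (i + 2) ' ' == 'o'

-- the recursive body of A; the fuel argument only makes the recursion structural (one pebble
-- disappears per recursion level, so `count('o') + 1` fuel is never exhausted — proved below)
def pebblesA : Nat → List Char → PySem.Dict (List Char) Int → Int × PySem.Dict (List Char) Int
  | 0, case0, d => ((pvCnt case0 : Int), d)
  | fuel + 1, case0, d =>
    let mini : Int := (pvCnt case0 : Int)
    if d.contains case0 then (d.getD case0 0, d)
    else
      let st1 := (PySem.List.pyRange 0 (PySem.List.len case0 - 2) 1).foldl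
        (fun (st : List Char × Int × PySem.Dict (List Char) Int) i =>
          if pvOmatch st.1 i then
            let c' := pvSpliceA st.1 i ['-', '-', 'o']
            let r := pebblesA fuel c' st.2.2
            let c'' := pvSpliceA c' i ['o', 'o', '-']
            (c'', (if r.1 < st.2.1 then r.1 else st.2.1), r.2)
          else st)
        (case0, mini, d)
      let d1 := st1.2.2.insert st1.1 st1.2.1
      let st2 := (PySem.List.pyRange 0 (PySem.List.len st1.1 - 2) 1).foldl
        (fun (st : List Char × Int × PySem.Dict (List Char) Int) i =>
          if pvDmatch st.1 i then
            let c' := pvSpliceA st.1 i ['o', '-', '-']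
            let r := pebblesA fuel c' st.2.2
            let c'' := pvSpliceA c' i ['-', 'o', 'o']
            (c'', (if r.1 < st.2.1 then r.1 else st.2.1), r.2)
          else st)
        (st1.1, st1.2.1, d1)
      let d2 := st2.2.2.insert st2.1 st2.2.1
      (st2.2.1, d2)

def min_pebbles (case : String) (registro : List (String × Int)) : Int :=
  (pebblesA (pvCnt case.toList + 1) case.toList
      (PySem.Dict.mk (registro.map (fun p => (p.1.toList, p.2))))).1

-- ===== PORT B =====
-- _succs(s): every board obtained from s by one jump, in position order
def pvSuccs (s : List Char) : List (List Char) :=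
  (PySem.List.pyRange 0 (PySem.List.len s - 2) 1).foldl
    (fun out i =>
      let w := PySem.List.slice s (some i) (some (i + 3))
      if w = ['o', 'o', '-'] then out ++ [pvSpliceA s i ['-', '-', 'o']]
      else if w = ['-', 'o', 'o'] then out ++ [pvSpliceA s i ['o', '-', '-']]
      else out)
    []

def min_pebbles_alt (case : String) (registro : List (String × Int)) : Int :=
  let d0 := PySem.Dict.mk (registro.map (fun p => (p.1.toList, p.2)))
  let c := case.toList
  if d0.contains c then d0.getD c 0
  else
    -- discovery, level by level: state (news, frontier)
    let disc := (List.range (pvCnt c + 1)).foldl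
      (fun (st : List (List Char) × List (List Char)) _ =>
        st.2.foldl
          (fun (q : List (List Char) × List (List Char)) s =>
            if s ∈ q.1 then q
            else
              ((q.1 ++ [s]),
               q.2 ++ (pvSuccs s).filter
                 (fun t => !(d0.contains t) && !(decide (t ∈ q.1 ++ [s])))))
          (st.1, ([] : List (List Char))))
      (([] : List (List Char)), [c])
    -- tabulation in increasing pebble count (registro[t] is always present: proved below)
    let dfin := (PySem.List.sorted disc.1 (fun s => pvCnt s)).foldl
      (fun (d : PySem.Dict (List Char) Int) s =>
        let best := (pvSuccs s).foldl
          (fun b t => if d.getD t 0 < b then d.getD t 0 else b) ((pvCnt s : Nat) : Int)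
        d.insert s best)
      d0
    dfin.getD c 0

-- ===== PRECONDITION & SPEC =====
def Spec_min_pebbles (case : String) (registro : List (String × Int)) (out : Int) : Prop := out = min_pebbles_alt case registro
instance (case : String) (registro : List (String × Int)) (out : Int) : Decidable (Spec_min_pebbles case registro out) := by unfold Spec_min_pebbles; infer_instance

-- ===== CLAIM (what is proved, stated in full; the proofs are below) =====
def Claim_equal_min_pebbles : Prop := ∀ (case : String) (registro : List (String × Int)), Dom_min_pebbles case registro → Spec_min_pebbles case registro (min_pebbles case registro)

-- ===== LEMMAS AND PROOFS =====

abbrev PD := PySem.Dict (List Char) Int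

-- ---- count bridge ----
lemma pvCnt_go : ∀ (fuel : Nat) (l : List Char) (acc : Nat), l.length ≤ fuel →
    PySem.Chars.count.go ['o'] fuel l acc = acc + l.count 'o' := by
  intro fuel
  induction fuel with
  | zero =>
    intro l acc h
    have : l = [] := by
      cases l with
      | nil => rfl
      | cons a t => simp at h
    subst this
    simp [PySem.Chars.count.go]
  | succ f ih =>
    intro l acc h
    cases l with
    | nil => simp [PySem.Chars.count.go]
    | cons a t =>
      by_cases ha : a = 'o'
      · subst ha
        have : (['o'] : List Char).isPrefixOf ('o' :: t) = true := by
          simp [List.isPrefixOf]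
        simp only [PySem.Chars.count.go, this, if_pos]
        have hd : List.drop (['o'] : List Char).length ('o' :: t) = t := by simp
        rw [hd, ih t (acc + 1) (by simpa using h)]
        simp [List.count_cons]
        omega
      · have : (['o'] : List Char).isPrefixOf (a :: t) = false := by
          simp [List.isPrefixOf]
          exact fun hh => absurd hh.symm ha
        simp only [PySem.Chars.count.go, this]
        simp only [Bool.false_eq_true, if_false]
        rw [ih t acc (by simpa using h)]
        simp [List.count_cons, ha]

lemma pvCnt_eq (s : List Char) : pvCnt s = s.count 'o' := by
  unfold pvCnt
  unfold PySem.Chars.count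
  simp only [List.isEmpty_cons, Bool.false_eq_true, if_false]
  simpa using pvCnt_go s.length s 0 le_rfl

-- ---- splice and decomposition ----
lemma splice_eq (s : List Char) (j : Nat) (mid : List Char) :
    pvSpliceA s (j : Int) mid = s.take j ++ mid ++ s.drop (j + 3) := by
  unfold pvSpliceA
  have h3 : ((j : Int) + 3) = ((j + 3 : Nat) : Int) := by push_cast; ring
  rw [h3, PySem.List.slice_to_natCast, PySem.List.slice_from_natCast]

lemma decomp (s : List Char) (j : Nat) (h : j + 2 < s.length) :
    s = s.take j ++ s[j] :: s[j+1] :: s[j+2] :: s.drop (j + 3) := by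
  have e1 : s.drop j = s[j]'(by omega) :: s.drop (j + 1) :=
    List.drop_eq_getElem_cons (by omega)
  have e2 : s.drop (j + 1) = s[j+1]'(by omega) :: s.drop (j + 2) := by
    have := List.drop_eq_getElem_cons (l := s) (i := j + 1) (by omega)
    simpa [show j + 1 + 1 = j + 2 by omega] using this
  have e3 : s.drop (j + 2) = s[j+2]'(by omega) :: s.drop (j + 3) := by
    have := List.drop_eq_getElem_cons (l := s) (i := j + 2) (by omega)
    simpa [show j + 2 + 1 = j + 3 by omega] using this
  conv_lhs => rw [← List.take_append_drop j s, e1, e2, e3]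

lemma splice_splice (s : List Char) (j : Nat) (h : j + 2 < s.length) (m₁ m₂ : List Char)
    (hm : m₁.length = 3) :
    pvSpliceA (pvSpliceA s (j : Int) m₁) (j : Int) m₂ = s.take j ++ m₂ ++ s.drop (j + 3) := by
  rw [splice_eq, splice_eq]
  have hlt : (s.take j).length = j := by simp; omega
  have h1 : (s.take j ++ m₁ ++ s.drop (j + 3)).take j = s.take j := by
    rw [List.append_assoc]
    exact List.take_left' hlt
  have h2 : (s.take j ++ m₁ ++ s.drop (j + 3)).drop (j + 3) = s.drop (j + 3) := by
    have : (s.take j ++ m₁).length = j + 3 := by simp [hm]; omega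
    exact List.drop_left' this
  rw [h1, h2]

-- ---- match predicates ----
lemma omatch_iff (s : List Char) (j : Nat) (h : j + 2 < s.length) :
    pvOmatch s (j : Int) = true ↔
      s[j]'(by omega) = 'o' ∧ s[j+1]'(by omega) = 'o' ∧ s[j+2]'(by omega) = '-' := by
  unfold pvOmatch
  have c1 : ((j : Int) + 1) = ((j + 1 : Nat) : Int) := by push_cast; ring
  have c2 : ((j : Int) + 2) = ((j + 2 : Nat) : Int) := by push_cast; ring
  rw [c1, c2]
  simp only [PySem.List.pyGetD_natCast]
  rw [List.getD_eq_getElem s ' ' (show j < s.length by omega),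
      List.getD_eq_getElem s ' ' (show j + 1 < s.length by omega),
      List.getD_eq_getElem s ' ' (show j + 2 < s.length by omega)]
  simp [and_assoc]

lemma dmatch_iff (s : List Char) (j : Nat) (h : j + 2 < s.length) :
    pvDmatch s (j : Int) = true ↔
      s[j]'(by omega) = '-' ∧ s[j+1]'(by omega) = 'o' ∧ s[j+2]'(by omega) = 'o' := by
  unfold pvDmatch
  have c1 : ((j : Int) + 1) = ((j + 1 : Nat) : Int) := by push_cast; ring
  have c2 : ((j : Int) + 2) = ((j + 2 : Nat) : Int) := by push_cast; ring
  rw [c1, c2]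
  simp only [PySem.List.pyGetD_natCast]
  rw [List.getD_eq_getElem s ' ' (show j < s.length by omega),
      List.getD_eq_getElem s ' ' (show j + 1 < s.length by omega),
      List.getD_eq_getElem s ' ' (show j + 2 < s.length by omega)]
  simp [and_assoc]

lemma restoreO (s : List Char) (j : Nat) (h : j + 2 < s.length) (hm : pvOmatch s (j : Int) = true) :
    pvSpliceA (pvSpliceA s (j : Int) ['-','-','o']) (j : Int) ['o','o','-'] = s := by
  obtain ⟨h0, h1, h2⟩ := (omatch_iff s j h).1 hm
  rw [splice_splice s j h _ _ (by rfl)]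
  conv_rhs => rw [decomp s j h]
  rw [h0, h1, h2]
  simp

lemma restoreD (s : List Char) (j : Nat) (h : j + 2 < s.length) (hm : pvDmatch s (j : Int) = true) :
    pvSpliceA (pvSpliceA s (j : Int) ['o','-','-']) (j : Int) ['-','o','o'] = s := by
  obtain ⟨h0, h1, h2⟩ := (dmatch_iff s j h).1 hm
  rw [splice_splice s j h _ _ (by rfl)]
  conv_rhs => rw [decomp s j h]
  rw [h0, h1, h2]
  simp

-- ---- successor list ----
def pvGO (s : List Char) (i : Int) : List (List Char) :=
  if pvOmatch s i then [pvSpliceA s i ['-','-','o']] else []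

def pvGD (s : List Char) (i : Int) : List (List Char) :=
  if pvDmatch s i then [pvSpliceA s i ['o','-','-']] else []

lemma range_mem (s : List Char) {i : Int}
    (hi : i ∈ PySem.List.pyRange 0 (PySem.List.len s - 2) 1) :
    ∃ j : Nat, i = (j : Int) ∧ j + 2 < s.length := by
  rw [PySem.List.mem_pyRange_one] at hi
  rw [PySem.List.len_eq] at hi
  exact ⟨i.toNat, by omega, by omega⟩

lemma slice3 (s : List Char) (j : Nat) (h : j + 2 < s.length) :
    PySem.List.slice s (some (j : Int)) (some ((j : Int) + 3)) =
      [s[j]'(by omega), s[j+1]'(by omega), s[j+2]'(by omega)] := by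
  have h3 : ((j : Int) + 3) = ((j + 3 : Nat) : Int) := by push_cast; ring
  have e1 : s.drop j = s[j]'(by omega) :: s.drop (j + 1) :=
    List.drop_eq_getElem_cons (by omega)
  have e2 : s.drop (j + 1) = s[j+1]'(by omega) :: s.drop (j + 2) := by
    have := List.drop_eq_getElem_cons (l := s) (i := j + 1) (by omega)
    simpa [show j + 1 + 1 = j + 2 by omega] using this
  have e3 : s.drop (j + 2) = s[j+2]'(by omega) :: s.drop (j + 3) := by
    have := List.drop_eq_getElem_cons (l := s) (i := j + 2) (by omega)
    simpa [show j + 2 + 1 = j + 3 by omega] using this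
  rw [h3, PySem.List.slice_natCast]
  have hd : j + 3 - j = 3 := by omega
  rw [hd, e1, e2, e3]
  rfl

lemma succs_eq (s : List Char) :
    pvSuccs s = (PySem.List.pyRange 0 (PySem.List.len s - 2) 1).flatMap
      (fun i => pvGO s i ++ pvGD s i) := by
  unfold pvSuccs
  rw [PySem.List.foldl_congr_mem _ _
      (fun out i => out ++ (pvGO s i ++ pvGD s i)) _ ?_]
  · rw [PySem.List.foldl_append_eq_flatMap]
    simp
  · intro acc i hi
    obtain ⟨j, rfl, hj⟩ := range_mem s hi
    rw [slice3 s j hj]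
    unfold pvGO pvGD
    have hOiff : ([s[j]'(by omega), s[j+1]'(by omega), s[j+2]'(by omega)] =
        (['o','o','-'] : List Char)) ↔ pvOmatch s (j : Int) = true := by
      rw [omatch_iff s j hj]; simp
    have hDiff : ([s[j]'(by omega), s[j+1]'(by omega), s[j+2]'(by omega)] =
        (['-','o','o'] : List Char)) ↔ pvDmatch s (j : Int) = true := by
      rw [dmatch_iff s j hj]; simp
    by_cases hO : pvOmatch s (j : Int) = true
    · have hD : pvDmatch s (j : Int) = false := by
        obtain ⟨h0, _, _⟩ := (omatch_iff s j hj).1 hO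
        by_cases hDt : pvDmatch s (j : Int) = true
        · obtain ⟨h0', _, _⟩ := (dmatch_iff s j hj).1 hDt
          rw [h0] at h0'; exact absurd h0' (by decide)
        · simpa using hDt
      rw [if_pos (hOiff.2 hO)]
      simp [hO, hD]
    · have hO' : pvOmatch s (j : Int) = false := by simpa using hO
      rw [if_neg (by rw [hOiff]; simp [hO'])]
      by_cases hD : pvDmatch s (j : Int) = true
      · rw [if_pos (hDiff.2 hD)]
        simp [hO', hD]
      · have hD' : pvDmatch s (j : Int) = false := by simpa using hD
        rw [if_neg (by rw [hDiff]; simp [hD'])]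
        simp [hO', hD']

lemma mem_succs {s t : List Char} (ht : t ∈ pvSuccs s) :
    ∃ j : Nat, j + 2 < s.length ∧
      ((pvOmatch s (j : Int) = true ∧ t = pvSpliceA s (j : Int) ['-','-','o']) ∨
       (pvDmatch s (j : Int) = true ∧ t = pvSpliceA s (j : Int) ['o','-','-'])) := by
  rw [succs_eq] at ht
  rw [List.mem_flatMap] at ht
  obtain ⟨i, hi, hmem⟩ := ht
  obtain ⟨j, rfl, hj⟩ := range_mem s hi
  refine ⟨j, hj, ?_⟩
  unfold pvGO pvGD at hmem
  rw [List.mem_append] at hmem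
  rcases hmem with hm | hm
  · left
    by_cases hO : pvOmatch s (j : Int) = true
    · rw [if_pos hO] at hm; simp at hm; exact ⟨hO, hm⟩
    · rw [if_neg hO] at hm; simp at hm
  · right
    by_cases hD : pvDmatch s (j : Int) = true
    · rw [if_pos hD] at hm; simp at hm; exact ⟨hD, hm⟩
    · rw [if_neg hD] at hm; simp at hm

lemma cnt_succ {s t : List Char} (ht : t ∈ pvSuccs s) : pvCnt t + 1 = pvCnt s := by
  obtain ⟨j, hj, hc⟩ := mem_succs ht
  rw [pvCnt_eq, pvCnt_eq]
  rcases hc with ⟨hm, rfl⟩ | ⟨hm, rfl⟩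
  · obtain ⟨h0, h1, h2⟩ := (omatch_iff s j hj).1 hm
    rw [splice_eq]
    conv_rhs => rw [decomp s j hj]
    simp [List.count_append, List.count_cons, h0, h1, h2]
    omega
  · obtain ⟨h0, h1, h2⟩ := (dmatch_iff s j hj).1 hm
    rw [splice_eq]
    conv_rhs => rw [decomp s j hj]
    simp [List.count_append, List.count_cons, h0, h1, h2]
    omega

-- ---- the common specification value ----
def pvVal (d0 : PD) : Nat → List Char → Int
  | 0, s => (pvCnt s : Int)
  | f + 1, s =>
    if d0.contains s then d0.getD s 0
    else (pvSuccs s).foldl (fun m t => min m (pvVal d0 f t)) ((pvCnt s : Nat) : Int)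

def pvV' (d0 : PD) (s : List Char) : Int := pvVal d0 (pvCnt s + 1) s

lemma pvVal_stable (d0 : PD) : ∀ (f : Nat) (s : List Char), pvCnt s + 1 ≤ f →
    pvVal d0 f s = pvV' d0 s := by
  intro f
  induction f using Nat.strong_induction_on with
  | _ f ih =>
    intro s hf
    obtain ⟨f', rfl⟩ : ∃ f', f = f' + 1 := ⟨f - 1, by omega⟩
    unfold pvV'
    show pvVal d0 (f' + 1) s = pvVal d0 (pvCnt s + 1) s
    simp only [pvVal]
    by_cases hc : d0.contains s = true
    · simp [hc]
    · simp only [hc, Bool.false_eq_true, if_false]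
      rw [PySem.List.foldl_congr_mem (pvSuccs s)
            (fun m t => min m (pvVal d0 f' t)) (fun m t => min m (pvV' d0 t)) _
            (by intro acc t htm
                have hcnt := cnt_succ htm
                simp only []
                rw [ih f' (by omega) t (by omega)]),
          PySem.List.foldl_congr_mem (pvSuccs s)
            (fun m t => min m (pvVal d0 (pvCnt s) t)) (fun m t => min m (pvV' d0 t)) _
            (by intro acc t htm
                have hcnt := cnt_succ htm
                simp only []
                rw [ih (pvCnt s) (by omega) t (by omega)])]

lemma pvV_contains (d0 : PD) (s : List Char) (h : d0.contains s = true) :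
    pvV' d0 s = d0.getD s 0 := by
  unfold pvV'
  simp only [pvVal]
  simp [h]

lemma pvV_rec (d0 : PD) (s : List Char) (h : d0.contains s = false) :
    pvV' d0 s = (pvSuccs s).foldl (fun m t => min m (pvV' d0 t)) ((pvCnt s : Nat) : Int) := by
  unfold pvV'
  conv_lhs => simp only [pvVal]
  simp only [h, Bool.false_eq_true, if_false]
  rw [PySem.List.foldl_congr_mem (pvSuccs s)
        (fun m t => min m (pvVal d0 (pvCnt s) t)) (fun m t => min m (pvV' d0 t)) _
        (by intro acc t htm
            have hcnt := cnt_succ htm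
            simp only []
            rw [pvVal_stable d0 (pvCnt s) t (by omega)])]
  rfl

-- ---- permutation utilities ----
lemma flatMap_append_perm {α β : Type} (l : List α) (f g : α → List β) :
    (l.flatMap fun x => f x ++ g x).Perm (l.flatMap f ++ l.flatMap g) := by
  induction l with
  | nil => simp
  | cons a l ih =>
    simp only [List.flatMap_cons]
    refine (ih.append_left (f a ++ g a)).trans ?_
    simp only [List.append_assoc]
    exact (List.perm_append_comm_assoc (g a) _ _).append_left (f a)

lemma minfold_perm (d0 : PD) {l₁ l₂ : List (List Char)} (h : l₁.Perm l₂) (a : Int) :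
    l₁.foldl (fun m t => min m (pvV' d0 t)) a = l₂.foldl (fun m t => min m (pvV' d0 t)) a := by
  exact List.Perm.foldl_eq (rcomm := ⟨fun b x y => by simp [min_right_comm]⟩) h a

-- ---- A-side invariant ----
def GoodB (d0 d : PD) (n : Nat) : Prop :=
  (∀ k, d0.contains k = true → d.get? k = d0.get? k) ∧
  (∀ k, d.contains k = true → d0.contains k = false → pvCnt k < n → d.getD k 0 = pvV' d0 k)

lemma GoodB_mono {d0 d : PD} {n n' : Nat} (h : n' ≤ n) (hg : GoodB d0 d n) : GoodB d0 d n' := by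
  exact ⟨hg.1, fun k h1 h2 h3 => hg.2 k h1 h2 (by omega)⟩

lemma pvMinIf (a b : Int) : (if a < b then a else b) = min b a := by
  rcases lt_or_ge a b with h | h
  · rw [if_pos h, min_eq_right h.le]
  · rw [if_neg (not_lt.2 h), min_eq_left h]

def pvLoopBody (f : Nat) (P : List Char → Int → Bool) (m₁ m₂ : List Char) :
    (List Char × Int × PD) → Int → (List Char × Int × PD) :=
  fun st i =>
    if P st.1 i then
      let c' := pvSpliceA st.1 i m₁
      let r := pebblesA f c' st.2.2
      let c'' := pvSpliceA c' i m₂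
      (c'', (if r.1 < st.2.1 then r.1 else st.2.1), r.2)
    else st

def AOk (d0 : PD) (f : Nat) (s : List Char) (d : PD) : Prop :=
  (pebblesA f s d).1 = pvV' d0 s ∧
  GoodB d0 (pebblesA f s d).2 (pvCnt s + 1) ∧
  (∀ k, d.contains k = true → (pebblesA f s d).2.get? k = d.get? k) ∧
  (∀ k, (pebblesA f s d).2.contains k = true → d.contains k = true ∨ pvCnt k ≤ pvCnt s)

lemma loopA (d0 : PD) (f : Nat) (s : List Char) (P : List Char → Int → Bool) (m₁ m₂ : List Char)
    (hIH : ∀ s' d', pvCnt s' < f → GoodB d0 d' (pvCnt s' + 1) → AOk d0 f s' d')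
    (hf : pvCnt s ≤ f)
    (hPmem : ∀ i, (∃ j : Nat, i = (j : Int) ∧ j + 2 < s.length) → P s i = true →
      pvSpliceA s i m₁ ∈ pvSuccs s ∧ pvSpliceA (pvSpliceA s i m₁) i m₂ = s) :
    ∀ (is : List Int) (m : Int) (d : PD),
      (∀ i ∈ is, ∃ j : Nat, i = (j : Int) ∧ j + 2 < s.length) →
      GoodB d0 d (pvCnt s) →
      (is.foldl (pvLoopBody f P m₁ m₂) (s, m, d)).1 = s ∧
      (is.foldl (pvLoopBody f P m₁ m₂) (s, m, d)).2.1 =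
        (is.flatMap (fun i => if P s i then [pvSpliceA s i m₁] else [])).foldl
          (fun m t => min m (pvV' d0 t)) m ∧
      GoodB d0 (is.foldl (pvLoopBody f P m₁ m₂) (s, m, d)).2.2 (pvCnt s) ∧
      (∀ k, d.contains k = true → (is.foldl (pvLoopBody f P m₁ m₂) (s, m, d)).2.2.get? k = d.get? k) ∧
      (∀ k, (is.foldl (pvLoopBody f P m₁ m₂) (s, m, d)).2.2.contains k = true →
        d.contains k = true ∨ pvCnt k < pvCnt s) := by
  intro is
  induction is with
  | nil =>
    intro m d hmem hg
    exact ⟨rfl, rfl, hg, fun k _ => rfl, fun k hk => Or.inl hk⟩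
  | cons i is' ih =>
    intro m d hmem hg
    obtain ⟨j, rfl, hj⟩ := hmem _ List.mem_cons_self
    have hmem' : ∀ x ∈ is', ∃ jj : Nat, x = (jj : Int) ∧ jj + 2 < s.length :=
      fun x hx => hmem x (List.mem_cons_of_mem _ hx)
    rw [List.foldl_cons, List.flatMap_cons]
    by_cases hP : P s ((j : Nat) : Int) = true
    · obtain ⟨hin, hres⟩ := hPmem ((j : Nat) : Int) ⟨j, rfl, hj⟩ hP
      have hcnt := cnt_succ hin
      have hA := hIH (pvSpliceA s ((j : Nat) : Int) m₁) d (by omega) (by rw [hcnt]; exact hg)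
      obtain ⟨hv, hg', hpres, hsmall⟩ := hA
      have hbody : pvLoopBody f P m₁ m₂ (s, m, d) ((j : Nat) : Int) =
          (s, min m (pvV' d0 (pvSpliceA s ((j : Nat) : Int) m₁)),
            (pebblesA f (pvSpliceA s ((j : Nat) : Int) m₁) d).2) := by
        simp [pvLoopBody, hP, hres, hv, pvMinIf]
      rw [hbody]
      have hgnew : GoodB d0 (pebblesA f (pvSpliceA s ((j : Nat) : Int) m₁) d).2 (pvCnt s) := by
        rw [← hcnt]; exact hg'
      obtain ⟨r1, r2, r3, r4, r5⟩ := ih (min m (pvV' d0 (pvSpliceA s ((j : Nat) : Int) m₁))) _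
        hmem' hgnew
      refine ⟨r1, ?_, r3, ?_, ?_⟩
      · rw [r2]; simp [hP]
      · intro k hk
        have hk' : (pebblesA f (pvSpliceA s ((j : Nat) : Int) m₁) d).2.contains k = true := by
          rw [PySem.Dict.contains_eq_isSome_get?, hpres k hk,
            ← PySem.Dict.contains_eq_isSome_get?]
          exact hk
        rw [r4 k hk', hpres k hk]
      · intro k hk
        rcases r5 k hk with h1 | h2
        · rcases hsmall k h1 with h3 | h4
          · exact Or.inl h3
          · exact Or.inr (by omega)
        · exact Or.inr h2
    · have hbody : pvLoopBody f P m₁ m₂ (s, m, d) ((j : Nat) : Int) = (s, m, d) := by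
        simp [pvLoopBody, hP]
      rw [hbody]
      obtain ⟨r1, r2, r3, r4, r5⟩ := ih m d hmem' hg
      refine ⟨r1, ?_, r3, r4, r5⟩
      rw [r2]; simp [hP]

lemma pebblesA_ok (d0 : PD) : ∀ (f : Nat) (s : List Char) (d : PD),
    pvCnt s < f → GoodB d0 d (pvCnt s + 1) → AOk d0 f s d := by
  intro f
  induction f with
  | zero => intro s d h _; exact absurd h (by omega)
  | succ f ihf =>
    intro s d hf hg
    unfold AOk
    by_cases hc : d.contains s = true
    · have hout : pebblesA (f + 1) s d = (d.getD s 0, d) := by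
        simp [pebblesA, hc]
      rw [hout]
      refine ⟨?_, hg, fun k _ => rfl, fun k hk => Or.inl hk⟩
      by_cases h0 : d0.contains s = true
      · rw [pvV_contains d0 s h0, PySem.Dict.getD_eq_get?_getD, PySem.Dict.getD_eq_get?_getD,
          hg.1 s h0]
      · exact hg.2 s hc (by simpa using h0) (by omega)
    · have hC : d.contains s = false := by simpa using hc
      have hs0 : d0.contains s = false := by
        by_contra h0
        have h0' : d0.contains s = true := by simpa using h0
        have hpr := hg.1 s h0'
        have hcon : d.contains s = true := by
          rw [PySem.Dict.contains_eq_isSome_get?, hpr, ← PySem.Dict.contains_eq_isSome_get?]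
          exact h0'
        rw [hcon] at hC; cases hC
      have ihf' : ∀ s' d', pvCnt s' < f → GoodB d0 d' (pvCnt s' + 1) → AOk d0 f s' d' :=
        fun s' d' a b => ihf s' d' a b
      have hPO : ∀ i, (∃ j : Nat, i = (j : Int) ∧ j + 2 < s.length) →
          pvOmatch s i = true →
          pvSpliceA s i ['-','-','o'] ∈ pvSuccs s ∧
            pvSpliceA (pvSpliceA s i ['-','-','o']) i ['o','o','-'] = s := by
        rintro i ⟨j, rfl, hj⟩ hP
        refine ⟨?_, restoreO s j hj hP⟩
        rw [succs_eq]
        refine List.mem_flatMap.2 ⟨(j : Int), ?_, ?_⟩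
        · rw [PySem.List.mem_pyRange_one, PySem.List.len_eq]; omega
        · simp [pvGO, pvGD, hP]
      have hPD : ∀ i, (∃ j : Nat, i = (j : Int) ∧ j + 2 < s.length) →
          pvDmatch s i = true →
          pvSpliceA s i ['o','-','-'] ∈ pvSuccs s ∧
            pvSpliceA (pvSpliceA s i ['o','-','-']) i ['-','o','o'] = s := by
        rintro i ⟨j, rfl, hj⟩ hP
        refine ⟨?_, restoreD s j hj hP⟩
        rw [succs_eq]
        refine List.mem_flatMap.2 ⟨(j : Int), ?_, ?_⟩
        · rw [PySem.List.mem_pyRange_one, PySem.List.len_eq]; omega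
        · simp [pvGO, pvGD, hP]
      obtain ⟨h11, h12, h13, h14, h15⟩ :=
        loopA d0 f s pvOmatch ['-','-','o'] ['o','o','-'] ihf' (by omega) hPO
          (PySem.List.pyRange 0 (PySem.List.len s - 2) 1) ((pvCnt s : Nat) : Int) d
          (fun i hi => range_mem s hi) (GoodB_mono (by omega) hg)
      set st1 := (PySem.List.pyRange 0 (PySem.List.len s - 2) 1).foldl
        (pvLoopBody f pvOmatch ['-','-','o'] ['o','o','-'])
        (s, ((pvCnt s : Nat) : Int), d) with hst1def
      have hgd1 : GoodB d0 (st1.2.2.insert s st1.2.1) (pvCnt s) := by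
        constructor
        · intro k hk
          have hne : k ≠ s := by rintro rfl; rw [hs0] at hk; cases hk
          rw [PySem.Dict.get?_insert, if_neg hne]
          exact h13.1 k hk
        · intro k hk hk0 hklt
          have hne : k ≠ s := by rintro rfl; omega
          rw [PySem.Dict.getD_insert, if_neg hne]
          have hk' : st1.2.2.contains k = true := by
            rw [PySem.Dict.contains_insert] at hk
            simpa [hne] using hk
          exact h13.2 k hk' hk0 hklt
      obtain ⟨h21, h22, h23, h24, h25⟩ :=
        loopA d0 f s pvDmatch ['o','-','-'] ['-','o','o'] ihf' (by omega) hPD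
          (PySem.List.pyRange 0 (PySem.List.len s - 2) 1) st1.2.1
          (st1.2.2.insert s st1.2.1) (fun i hi => range_mem s hi) hgd1
      have hunf : pebblesA (f + 1) s d =
          (((PySem.List.pyRange 0 (PySem.List.len st1.1 - 2) 1).foldl
            (pvLoopBody f pvDmatch ['o','-','-'] ['-','o','o'])
            (st1.1, st1.2.1, st1.2.2.insert st1.1 st1.2.1)).2.1, ((PySem.List.pyRange 0 (PySem.List.len st1.1 - 2) 1).foldl
            (pvLoopBody f pvDmatch ['o','-','-'] ['-','o','o'])
            (st1.1, st1.2.1, st1.2.2.insert st1.1 st1.2.1)).2.2.insert ((PySem.List.pyRange 0 (PySem.List.len st1.1 - 2) 1).foldl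
            (pvLoopBody f pvDmatch ['o','-','-'] ['-','o','o'])
            (st1.1, st1.2.1, st1.2.2.insert st1.1 st1.2.1)).1 ((PySem.List.pyRange 0 (PySem.List.len st1.1 - 2) 1).foldl
            (pvLoopBody f pvDmatch ['o','-','-'] ['-','o','o'])
            (st1.1, st1.2.1, st1.2.2.insert st1.1 st1.2.1)).2.1) := by
        simp only [pebblesA, hC, Bool.false_eq_true, if_false]
        rfl
      rw [h11] at hunf
      have hval : (((PySem.List.pyRange 0 (PySem.List.len s - 2) 1).foldl
          (pvLoopBody f pvDmatch ['o','-','-'] ['-','o','o'])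
          (s, st1.2.1, st1.2.2.insert s st1.2.1))).2.1 = pvV' d0 s := by
        rw [h22, h12, ← List.foldl_append, pvV_rec d0 s hs0]
        have hperm : (pvSuccs s).Perm
            (((PySem.List.pyRange 0 (PySem.List.len s - 2) 1).flatMap
                (fun i => if pvOmatch s i = true then [pvSpliceA s i ['-','-','o']] else [])) ++
             ((PySem.List.pyRange 0 (PySem.List.len s - 2) 1).flatMap
                (fun i => if pvDmatch s i = true then [pvSpliceA s i ['o','-','-']] else []))) := by
          rw [succs_eq]
          have hfp := flatMap_append_perm (PySem.List.pyRange 0 (PySem.List.len s - 2) 1)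
            (fun i => if pvOmatch s i = true then [pvSpliceA s i ['-','-','o']] else [])
            (fun i => if pvDmatch s i = true then [pvSpliceA s i ['o','-','-']] else [])
          refine List.Perm.trans ?_ hfp
          simp [pvGO, pvGD]
        exact (minfold_perm d0 hperm _).symm
      set st2 := ((PySem.List.pyRange 0 (PySem.List.len s - 2) 1).foldl
          (pvLoopBody f pvDmatch ['o','-','-'] ['-','o','o'])
          (s, st1.2.1, st1.2.2.insert s st1.2.1)) with hst2def
      have hGfinal : GoodB d0 (st2.2.2.insert s st2.2.1) (pvCnt s + 1) := by
        constructor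
        · intro k hk
          have hne : k ≠ s := by rintro rfl; rw [hs0] at hk; cases hk
          rw [PySem.Dict.get?_insert, if_neg hne]
          exact h23.1 k hk
        · intro k hk hk0 hklt
          by_cases hks : k = s
          · subst hks
            rw [PySem.Dict.getD_insert_self]
            exact hval
          · rw [PySem.Dict.getD_insert, if_neg hks]
            have hk' : st2.2.2.contains k = true := by
              rw [PySem.Dict.contains_insert] at hk
              simpa [hks] using hk
            rcases Nat.lt_or_ge (pvCnt k) (pvCnt s) with hlt | hge
            · exact h23.2 k hk' hk0 hlt
            · rcases h25 k hk' with hd1 | hsm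
              · have hk'' : st1.2.2.contains k = true := by
                  rw [PySem.Dict.contains_insert] at hd1
                  simpa [hks] using hd1
                rcases h15 k hk'' with hd | hsm2
                · have hval0 := hg.2 k hd hk0 (by omega)
                  have e1 : st1.2.2.get? k = d.get? k := h14 k hd
                  have e2 : (st1.2.2.insert s st1.2.1).get? k = st1.2.2.get? k := by
                    rw [PySem.Dict.get?_insert, if_neg hks]
                  have hcd1 : (st1.2.2.insert s st1.2.1).contains k = true := by
                    rw [PySem.Dict.contains_insert]; simp [hk'']
                  have e3 : st2.2.2.get? k = (st1.2.2.insert s st1.2.1).get? k := h24 k hcd1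
                  rw [PySem.Dict.getD_eq_get?_getD, e3, e2, e1, ← PySem.Dict.getD_eq_get?_getD]
                  exact hval0
                · omega
              · omega
      refine ⟨?_, ?_, ?_, ?_⟩
      · rw [hunf]; exact hval
      · rw [hunf, h21]; exact hGfinal
      · intro k hk
        rw [hunf, h21]
        have hne : k ≠ s := by rintro rfl; rw [hC] at hk; cases hk
        rw [PySem.Dict.get?_insert, if_neg hne]
        have hk1 : st1.2.2.contains k = true := by
          rw [PySem.Dict.contains_eq_isSome_get?, h14 k hk,
            ← PySem.Dict.contains_eq_isSome_get?]
          exact hk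
        have hcd1 : (st1.2.2.insert s st1.2.1).contains k = true := by
          rw [PySem.Dict.contains_insert]; simp [hk1]
        rw [h24 k hcd1, PySem.Dict.get?_insert, if_neg hne, h14 k hk]
      · intro k hk
        rw [hunf, h21] at hk
        rw [PySem.Dict.contains_insert] at hk
        simp only [Bool.or_eq_true, beq_iff_eq] at hk
        rcases hk with rfl | hk2
        · exact Or.inr (le_refl _)
        · rcases h25 k hk2 with hd1 | hsm
          · rw [PySem.Dict.contains_insert] at hd1
            simp only [Bool.or_eq_true, beq_iff_eq] at hd1
            rcases hd1 with rfl | hk3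
            · exact Or.inr (le_refl _)
            · rcases h15 k hk3 with hd | hsm2
              · exact Or.inl hd
              · exact Or.inr (by omega)
          · exact Or.inr (by omega)

-- ---- B-side: discovery ----
def pvStep (d0 : PD) (q : List (List Char) × List (List Char)) (s : List Char) :
    List (List Char) × List (List Char) :=
  if s ∈ q.1 then q
  else
    ((q.1 ++ [s]),
     q.2 ++ (pvSuccs s).filter (fun t => !(d0.contains t) && !(decide (t ∈ q.1 ++ [s]))))

def pvLevel (d0 : PD) (st : List (List Char) × List (List Char)) :
    List (List Char) × List (List Char) :=
  st.2.foldl (pvStep d0) (st.1, ([] : List (List Char)))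

def BInv (d0 : PD) (c : List Char) (k : Nat) (st : List (List Char) × List (List Char)) : Prop :=
  st.1.Nodup ∧
  (∀ s ∈ st.1, d0.contains s = false) ∧
  (∀ s ∈ st.2, d0.contains s = false ∧ pvCnt s + k = pvCnt c) ∧
  (c ∈ st.1 ∨ c ∈ st.2) ∧
  (∀ s ∈ st.1, ∀ t ∈ pvSuccs s, d0.contains t = true ∨ t ∈ st.1 ∨ t ∈ st.2)

lemma inner_spec (d0 : PD) : ∀ (fr : List (List Char)) (q : List (List Char) × List (List Char)),
    (∀ x, x ∈ (fr.foldl (pvStep d0) q).1 ↔ x ∈ q.1 ∨ x ∈ fr) ∧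
    (q.1.Nodup → (fr.foldl (pvStep d0) q).1.Nodup) ∧
    (∀ t ∈ (fr.foldl (pvStep d0) q).2, t ∈ q.2 ∨
      ∃ u ∈ fr, t ∈ pvSuccs u ∧ d0.contains t = false) ∧
    ((∀ s ∈ q.1, ∀ t ∈ pvSuccs s, d0.contains t = true ∨ t ∈ q.1 ∨ t ∈ q.2 ∨ t ∈ fr) →
      ∀ s ∈ (fr.foldl (pvStep d0) q).1, ∀ t ∈ pvSuccs s,
        d0.contains t = true ∨ t ∈ (fr.foldl (pvStep d0) q).1 ∨ t ∈ (fr.foldl (pvStep d0) q).2) := by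
  intro fr
  induction fr with
  | nil =>
    intro q
    refine ⟨by simp, fun h => h, fun t ht => Or.inl ht, fun H s hs t ht => ?_⟩
    rcases H s hs t ht with h | h | h | h
    · exact Or.inl h
    · exact Or.inr (Or.inl h)
    · exact Or.inr (Or.inr h)
    · simp at h
  | cons s fr' ih =>
    intro q
    rw [List.foldl_cons]
    obtain ⟨i1, i2, i3, i4⟩ := ih (pvStep d0 q s)
    have hq1 : ∀ x, x ∈ (pvStep d0 q s).1 ↔ x ∈ q.1 ∨ x = s := by
      intro x
      unfold pvStep
      by_cases hs : s ∈ q.1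
      · rw [if_pos hs]
        constructor
        · exact Or.inl
        · rintro (h | rfl)
          · exact h
          · exact hs
      · rw [if_neg hs]; simp
    have hq2 : ∀ t, t ∈ (pvStep d0 q s).2 →
        t ∈ q.2 ∨ (t ∈ pvSuccs s ∧ d0.contains t = false) := by
      intro t ht
      unfold pvStep at ht
      by_cases hs : s ∈ q.1
      · rw [if_pos hs] at ht; exact Or.inl ht
      · rw [if_neg hs] at ht
        rcases List.mem_append.1 ht with h | h
        · exact Or.inl h
        · have hm := List.mem_filter.1 h
          refine Or.inr ⟨hm.1, ?_⟩
          have := hm.2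
          simp only [Bool.and_eq_true, Bool.not_eq_true'] at this
          exact this.1
    have hq2' : ∀ t, t ∈ q.2 → t ∈ (pvStep d0 q s).2 := by
      intro t ht
      unfold pvStep
      by_cases hs : s ∈ q.1
      · rw [if_pos hs]; exact ht
      · rw [if_neg hs]; exact List.mem_append_left _ ht
    refine ⟨?_, ?_, ?_, ?_⟩
    · intro x
      rw [i1 x, hq1 x]
      simp only [List.mem_cons]
      tauto
    · intro hnd
      apply i2
      unfold pvStep
      by_cases hs : s ∈ q.1
      · rw [if_pos hs]; exact hnd
      · rw [if_neg hs]
        rw [List.nodup_append]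
        refine ⟨hnd, List.nodup_singleton s, ?_⟩
        intro a ha b hb
        have hbs : b = s := by simpa using hb
        subst hbs
        intro hab
        subst hab
        exact hs ha
    · intro t ht
      rcases i3 t ht with h | ⟨u, hu, hsu⟩
      · rcases hq2 t h with h' | h'
        · exact Or.inl h'
        · exact Or.inr ⟨s, List.mem_cons_self, h'.1, h'.2⟩
      · exact Or.inr ⟨u, List.mem_cons_of_mem _ hu, hsu⟩
    · intro H x hx t ht
      apply i4 ?_ x hx t ht
      intro y hy u hu
      rcases (hq1 y).1 hy with hyq | rfl
      · rcases H y hyq u hu with h | h | h | h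
        · exact Or.inl h
        · exact Or.inr (Or.inl ((hq1 u).2 (Or.inl h)))
        · exact Or.inr (Or.inr (Or.inl (hq2' u h)))
        · rcases List.mem_cons.1 h with rfl | h'
          · exact Or.inr (Or.inl ((hq1 u).2 (Or.inr rfl)))
          · exact Or.inr (Or.inr (Or.inr h'))
      · by_cases hs : y ∈ q.1
        · have hq' : pvStep d0 q y = q := by unfold pvStep; rw [if_pos hs]
          rw [hq']
          rcases H y hs u hu with h | h | h | h
          · exact Or.inl h
          · exact Or.inr (Or.inl h)
          · exact Or.inr (Or.inr (Or.inl h))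
          · rcases List.mem_cons.1 h with rfl | h'
            · exact Or.inr (Or.inl hs)
            · exact Or.inr (Or.inr (Or.inr h'))
        · have hq' : pvStep d0 q y = (q.1 ++ [y], q.2 ++ (pvSuccs y).filter
              (fun t => !(d0.contains t) && !(decide (t ∈ q.1 ++ [y])))) := by
            unfold pvStep; rw [if_neg hs]
          rw [hq']
          by_cases hcu : d0.contains u = true
          · exact Or.inl hcu
          · by_cases hm : u ∈ q.1 ++ [y]
            · exact Or.inr (Or.inl hm)
            · refine Or.inr (Or.inr (Or.inl ?_))
              refine List.mem_append_right _ (List.mem_filter.2 ⟨hu, ?_⟩)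
              simp [hcu, hm]

lemma level_inv (d0 : PD) (c : List Char) (k : Nat) (st : List (List Char) × List (List Char))
    (h : BInv d0 c k st) : BInv d0 c (k + 1) (pvLevel d0 st) := by
  obtain ⟨hnd, hnews, hfr, hcin, hcl⟩ := h
  obtain ⟨i1, i2, i3, i4⟩ := inner_spec d0 st.2 (st.1, ([] : List (List Char)))
  refine ⟨i2 hnd, ?_, ?_, ?_, ?_⟩
  · intro s hs
    rcases (i1 s).1 hs with h | h
    · exact hnews s h
    · exact (hfr s h).1
  · intro s hs
    rcases i3 s hs with h | ⟨u, hu, hsu, hcu⟩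
    · simp at h
    · refine ⟨hcu, ?_⟩
      have h2 := (hfr u hu).2
      have hcnt := cnt_succ hsu
      omega
  · left
    rcases hcin with h | h
    · exact (i1 c).2 (Or.inl h)
    · exact (i1 c).2 (Or.inr h)
  · apply i4
    intro y hy t ht
    rcases hcl y hy t ht with h | h | h
    · exact Or.inl h
    · exact Or.inr (Or.inl h)
    · exact Or.inr (Or.inr (Or.inr h))

lemma range_foldl_level (d0 : PD) (st0 : List (List Char) × List (List Char)) :
    ∀ n : Nat, (List.range n).foldl (fun st _ => pvLevel d0 st) st0 =
      (fun st => pvLevel d0 st)^[n] st0 := by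
  intro n
  induction n with
  | zero => simp
  | succ n ih =>
    rw [List.range_succ, List.foldl_append, ih, List.foldl_cons, List.foldl_nil,
      Function.iterate_succ_apply']

lemma discovery_spec (d0 : PD) (c : List Char) (hc : d0.contains c = false) :
    (((List.range (pvCnt c + 1)).foldl
      (fun st _ => pvLevel d0 st) (([] : List (List Char)), [c])).1).Nodup ∧
    c ∈ (((List.range (pvCnt c + 1)).foldl
      (fun st _ => pvLevel d0 st) (([] : List (List Char)), [c])).1) ∧
    (∀ s ∈ (((List.range (pvCnt c + 1)).foldl
      (fun st _ => pvLevel d0 st) (([] : List (List Char)), [c])).1),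
      d0.contains s = false) ∧
    (∀ s ∈ (((List.range (pvCnt c + 1)).foldl
      (fun st _ => pvLevel d0 st) (([] : List (List Char)), [c])).1),
      ∀ t ∈ pvSuccs s, d0.contains t = true ∨
        t ∈ (((List.range (pvCnt c + 1)).foldl
          (fun st _ => pvLevel d0 st) (([] : List (List Char)), [c])).1)) := by
  have hbase : BInv d0 c 0 (([] : List (List Char)), [c]) := by
    refine ⟨List.nodup_nil, by simp, ?_, Or.inr (by simp), by simp⟩
    intro s hs
    simp only [List.mem_singleton] at hs
    subst hs
    exact ⟨hc, by simp⟩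
  have hiter : ∀ n, BInv d0 c n ((fun st => pvLevel d0 st)^[n] (([] : List (List Char)), [c])) := by
    intro n
    induction n with
    | zero => exact hbase
    | succ n ih =>
      rw [Function.iterate_succ_apply']
      exact level_inv d0 c n _ ih
  obtain ⟨w1, w2, w3, w4, w5⟩ := hiter (pvCnt c + 1)
  have hempty : ((fun st => pvLevel d0 st)^[pvCnt c + 1] (([] : List (List Char)), [c])).2 = [] := by
    rw [List.eq_nil_iff_forall_not_mem]
    intro s hs
    have := (w3 s hs).2
    omega
  rw [range_foldl_level d0 (([] : List (List Char)), [c]) (pvCnt c + 1)]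
  refine ⟨w1, ?_, w2, ?_⟩
  · rcases w4 with h | h
    · exact h
    · rw [hempty] at h; simp at h
  · intro s hs t ht
    rcases w5 s hs t ht with h | h | h
    · exact Or.inl h
    · exact Or.inr h
    · rw [hempty] at h; simp at h

-- ---- B-side: tabulation ----
def pvTab (d : PD) (s : List Char) : PD :=
  d.insert s ((pvSuccs s).foldl
    (fun b t => if d.getD t 0 < b then d.getD t 0 else b) ((pvCnt s : Nat) : Int))

lemma tab_spec (d0 : PD) (news : List (List Char))
    (hnd : news.Nodup) (hnc : ∀ s ∈ news, d0.contains s = false)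
    (hcl : ∀ s ∈ news, ∀ t ∈ pvSuccs s, d0.contains t = true ∨ t ∈ news) :
    ∀ (rest p : List (List Char)) (d : PD),
      PySem.List.sorted news (fun s => pvCnt s) = p ++ rest →
      (∀ k, d0.contains k = true → d.get? k = d0.get? k) →
      (∀ k, d.contains k = true ↔ d0.contains k = true ∨ k ∈ p) →
      (∀ k ∈ p, d.getD k 0 = pvV' d0 k) →
      (∀ k ∈ p ++ rest, (rest.foldl pvTab d).getD k 0 = pvV' d0 k) := by
  intro rest
  induction rest with
  | nil =>
    intro p d hsort h1 h2 h3 k hk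
    rw [List.append_nil] at hk
    exact h3 k hk
  | cons s rest' ih =>
    intro p d hsort h1 h2 h3
    have hperm := PySem.List.sorted_perm news (fun s => pvCnt s) false
    have hordnd : (PySem.List.sorted news (fun s => pvCnt s)).Nodup :=
      (List.Perm.nodup_iff hperm).2 hnd
    have hsmem : s ∈ news := hperm.mem_iff.1
      (by rw [hsort]; exact List.mem_append_right _ List.mem_cons_self)
    have hsnp : s ∉ p := by
      intro hsp
      rw [hsort] at hordnd
      exact (List.disjoint_of_nodup_append hordnd) hsp List.mem_cons_self
    have hpw := PySem.List.sorted_pairwise news (fun s => pvCnt s)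
    rw [hsort] at hpw
    have hpw2 := (List.pairwise_append.1 hpw).2.1
    have hcontains_s : d0.contains s = false := hnc s hsmem
    have hbest : (pvSuccs s).foldl (fun b t => if d.getD t 0 < b then d.getD t 0 else b)
        ((pvCnt s : Nat) : Int) = pvV' d0 s := by
      rw [pvV_rec d0 s hcontains_s]
      apply PySem.List.foldl_congr_mem
      intro b t htm
      rw [pvMinIf]
      congr 1
      have hcnt := cnt_succ htm
      rcases hcl s hsmem t htm with hct | htn
      · rw [PySem.Dict.getD_eq_get?_getD, h1 t hct, ← PySem.Dict.getD_eq_get?_getD]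
        exact (pvV_contains d0 t hct).symm
      · have htord : t ∈ p ++ s :: rest' := by
          rw [← hsort]; exact hperm.mem_iff.2 htn
        have htp : t ∈ p := by
          rcases List.mem_append.1 htord with h | h
          · exact h
          · rcases List.mem_cons.1 h with rfl | h'
            · omega
            · have := (List.pairwise_cons.1 hpw2).1 t h'
              omega
        exact h3 t htp
    rw [List.foldl_cons]
    have hstep : pvTab d s = d.insert s (pvV' d0 s) := by
      unfold pvTab; rw [hbest]
    rw [hstep]
    have happ := ih (p ++ [s]) (d.insert s (pvV' d0 s)) (by rw [hsort]; simp) ?_ ?_ ?_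
    · intro k hk
      apply happ
      simp only [List.mem_append, List.mem_cons, List.mem_singleton] at hk ⊢
      tauto
    · intro k hkc
      have hne : k ≠ s := by rintro rfl; rw [hcontains_s] at hkc; cases hkc
      rw [PySem.Dict.get?_insert, if_neg hne]
      exact h1 k hkc
    · intro k
      rw [PySem.Dict.contains_insert]
      simp only [Bool.or_eq_true, beq_iff_eq]
      rw [h2 k]
      simp only [List.mem_append, List.mem_singleton]
      tauto
    · intro k hk
      rcases List.mem_append.1 hk with hkp | hks
      · have hne : k ≠ s := by rintro rfl; exact hsnp hkp
        rw [PySem.Dict.getD_insert, if_neg hne]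
        exact h3 k hkp
      · rw [List.mem_singleton] at hks
        subst hks
        rw [PySem.Dict.getD_insert, if_pos rfl]

-- ---- assembling both sides ----
lemma A_eq (case : String) (registro : List (String × Int)) :
    min_pebbles case registro =
      pvV' (PySem.Dict.mk (registro.map (fun p => (p.1.toList, p.2)))) case.toList := by
  unfold min_pebbles
  have hg0 : GoodB (PySem.Dict.mk (registro.map (fun p => (p.1.toList, p.2))))
      (PySem.Dict.mk (registro.map (fun p => (p.1.toList, p.2))))
      (pvCnt case.toList + 1) :=
    ⟨fun k _ => rfl, fun k h1 h2 _ => by rw [h1] at h2; cases h2⟩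
  exact (pebblesA_ok _ (pvCnt case.toList + 1) case.toList _ (by omega) hg0).1

lemma B_eq (case : String) (registro : List (String × Int)) :
    min_pebbles_alt case registro =
      pvV' (PySem.Dict.mk (registro.map (fun p => (p.1.toList, p.2)))) case.toList := by
  set d0 := PySem.Dict.mk (registro.map (fun p => (p.1.toList, p.2))) with hd0def
  set c := case.toList with hcdef
  by_cases hc : d0.contains c = true
  · have hrw : min_pebbles_alt case registro = d0.getD c 0 := by
      simp only [min_pebbles_alt]
      rw [if_pos hc]
    rw [hrw, pvV_contains d0 c hc]
  · have hcf : d0.contains c = false := by simpa using hc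
    obtain ⟨hnd, hcm, hnc, hcl⟩ := discovery_spec d0 c hcf
    have hrw : min_pebbles_alt case registro =
        ((PySem.List.sorted (((List.range (pvCnt c + 1)).foldl
            (fun st _ => pvLevel d0 st) (([] : List (List Char)), [c])).1)
          (fun s => pvCnt s)).foldl pvTab d0).getD c 0 := by
      simp only [min_pebbles_alt]
      rw [if_neg (by rw [hcf]; simp)]
      rfl
    rw [hrw]
    have htab := tab_spec d0 _ hnd hnc hcl
      (PySem.List.sorted (((List.range (pvCnt c + 1)).foldl
          (fun st _ => pvLevel d0 st) (([] : List (List Char)), [c])).1)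
        (fun s => pvCnt s)) [] d0 (by simp) (fun k _ => rfl) (fun k => by simp) (by simp)
    have hcord : c ∈ ([] : List (List Char)) ++ PySem.List.sorted
        (((List.range (pvCnt c + 1)).foldl
            (fun st _ => pvLevel d0 st) (([] : List (List Char)), [c])).1)
        (fun s => pvCnt s) := by
      simp only [List.nil_append]
      exact (PySem.List.sorted_perm _ _ false).mem_iff.2 hcm
    exact htab c hcord



-- ===== VERDICT (by name: the statement is the Claim_ definition above) =====
theorem min_pebbles_spec : Claim_equal_min_pebbles := by
  intro case registro _
  unfold Spec_min_pebbles
  rw [A_eq, B_eq]
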